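-- pv_equiv track=rewrite | github.com/jshams/Tweet-Generator | histogram.py | touplogram
-- ===== SOURCE A (Python) =====
-- def touplogram(list_of_words):
--     #list of touples
--     # histogram = [('one', 1), ('fish', 4), ('two', 1), ('red', 1), ('blue', 1)]
--     # my result = [('one', 1), ('fish', 4), ('two', 1), ('red', 1), ('blue', 1)]
--     list_of_touples = []
--     for word in list_of_words:
--         in_list = False
--         for touple in list_of_touples:
--             if word == touple[0]:
--                 count = touple[1] + 1
--                 list_of_touples.remove(touple)
--                 list_of_touples.append((word, count))
--                 in_list = True
--                 break
--         if not in_list: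
--             list_of_touples.append((word, 1))
--     return list_of_touples
-- ===== SOURCE B (Python) =====
-- def touplogram(list_of_words):
--     counts = {}
--     for word in list_of_words:
--         counts[word] = counts.get(word, 0) + 1
--     result = []
--     seen = set()
--     for word in reversed(list_of_words):
--         if word not in seen:
--             result.append((word, counts[word]))
--             seen.add(word)
--     result.reverse()
--     return result
-- ===== Notes on version B (the rewrite author's own statement) =====
-- stated objective: faster
-- what changed: Replaces A's move-to-end loop (inner scan plus list.remove per word) with one counting pass over a dict and one reversed pass with a seen set that emits each word at its last occurrence, then reverses the result.
import Mathlib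
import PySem

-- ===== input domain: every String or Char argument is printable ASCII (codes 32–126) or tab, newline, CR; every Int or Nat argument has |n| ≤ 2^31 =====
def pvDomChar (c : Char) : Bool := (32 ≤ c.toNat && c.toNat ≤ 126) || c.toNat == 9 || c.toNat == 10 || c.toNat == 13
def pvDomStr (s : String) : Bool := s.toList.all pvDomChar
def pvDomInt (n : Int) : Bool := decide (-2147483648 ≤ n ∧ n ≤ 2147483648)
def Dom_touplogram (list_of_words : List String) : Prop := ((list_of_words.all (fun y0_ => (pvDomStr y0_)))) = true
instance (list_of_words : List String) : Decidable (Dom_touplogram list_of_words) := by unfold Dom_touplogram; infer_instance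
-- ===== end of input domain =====

-- B replaces A's quadratic move-to-end loop (inner scan + list.remove per word) by a
-- counting dict built in one pass plus one reversed pass with a seen set; same result.

-- ===== PORT A =====
-- A's inner 'for touple in list_of_touples: … break' scan; 'full' is the whole current list,
-- on which Python performs list.remove (exact via PySem.List.remove?; the match is present, so getD is never the default).
def touplogramInner (w : String) : List (String × Int) → List (String × Int) → List (String × Int)
  | [], full => full ++ [(w, 1)]
  | t :: rest, full =>
      if w == t.1 then ((PySem.List.remove? full t).getD full) ++ [(w, t.2 + 1)]
      else touplogramInner w rest full

def touplogram (list_of_words : List String) : List (String × Int) :=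
  list_of_words.foldl (fun acc w => touplogramInner w acc acc) []

-- ===== PORT B =====
def touplogram_alt (list_of_words : List String) : List (String × Int) :=
  let counts : PySem.Dict String Int :=
    list_of_words.foldl (fun d w => d.insert w (d.getD w 0 + 1)) PySem.Dict.empty
  let p := list_of_words.reverse.foldl
      (fun (st : List (String × Int) × PySem.Set String) w =>
        if PySem.Set.contains st.2 w then st
        else (st.1 ++ [(w, counts.getD w 0)], PySem.Set.add st.2 w))
      ([], PySem.Set.empty)
  p.1.reverse

-- ===== PRECONDITION & SPEC =====
def Spec_touplogram (list_of_words : List String) (out : List (String × Int)) : Prop := out = touplogram_alt list_of_words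
instance (list_of_words : List String) (out : List (String × Int)) : Decidable (Spec_touplogram list_of_words out) := by unfold Spec_touplogram; infer_instance

-- ===== CLAIM (what is proved, stated in full; the proofs are below) =====
def Claim_equal_touplogram : Prop := ∀ (list_of_words : List String), Dom_touplogram list_of_words → Spec_touplogram list_of_words (touplogram list_of_words)

-- ===== LEMMAS AND PROOFS =====

-- first-occurrence order of r, skipping words already in 'seen' s
def kfE : List String → List String → List String
  | [], _ => []
  | w :: r, s => if w ∈ s then kfE r s else w :: kfE r (w :: s)

-- last-occurrence order of the words of l (both programs list words in this order)
def lastOrd (l : List String) : List String := (kfE l.reverse []).reverse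

-- the common value of both programs: words in last-occurrence order, with their counts
def cano (l : List String) : List (String × Int) :=
  (lastOrd l).map (fun x => (x, (l.count x : Int)))

theorem kfE_congr : ∀ (r : List String) {s s' : List String},
    (∀ x, x ∈ s ↔ x ∈ s') → kfE r s = kfE r s'
  | [], _, _, _ => rfl
  | w :: r, s, s', h => by
    simp only [kfE]
    by_cases hw : w ∈ s
    · rw [if_pos hw, if_pos ((h w).1 hw)]
      exact kfE_congr r h
    · rw [if_neg hw, if_neg (fun hc => hw ((h w).2 hc))]
      refine congrArg (w :: ·) (kfE_congr r fun x => ?_)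
      simp only [List.mem_cons]
      exact or_congr Iff.rfl (h x)

theorem mem_kfE : ∀ (r s : List String) (x : String), x ∈ kfE r s ↔ x ∈ r ∧ x ∉ s
  | [], s, x => by simp [kfE]
  | w :: r, s, x => by
    simp only [kfE]
    by_cases hw : w ∈ s
    · rw [if_pos hw, mem_kfE r s x]
      simp only [List.mem_cons]
      constructor
      · exact fun ⟨h1, h2⟩ => ⟨Or.inr h1, h2⟩
      · rintro ⟨h1 | h1, h2⟩
        · exact absurd (h1 ▸ hw) h2
        · exact ⟨h1, h2⟩
    · rw [if_neg hw]
      simp only [List.mem_cons, mem_kfE r (w :: s) x, List.mem_cons]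
      by_cases hx : x = w
      · subst hx; simp [hw]
      · simp [hx]

theorem nodup_kfE : ∀ (r s : List String), (kfE r s).Nodup
  | [], _ => List.nodup_nil
  | w :: r, s => by
    simp only [kfE]
    by_cases hw : w ∈ s
    · rw [if_pos hw]; exact nodup_kfE r s
    · rw [if_neg hw]
      refine List.nodup_cons.2 ⟨fun hc => ?_, nodup_kfE r (w :: s)⟩
      exact ((mem_kfE r (w :: s) w).1 hc).2 (List.mem_cons_self)

theorem kfE_cons_seen : ∀ (r : List String) (w : String) (s : List String),
    kfE r (w :: s) = (kfE r s).erase w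
  | [], w, s => rfl
  | v :: r, w, s => by
    simp only [kfE]
    by_cases hv : v ∈ s
    · rw [if_pos hv, if_pos (List.mem_cons_of_mem _ hv)]
      exact kfE_cons_seen r w s
    · rw [if_neg hv]
      by_cases hvw : v = w
      · subst hvw
        rw [if_pos List.mem_cons_self, List.erase_cons_head]
      · rw [if_neg (by simp [hv, hvw]), List.erase_cons_tail (by simp [hvw])]
        rw [← kfE_cons_seen r w (v :: s)]
        refine congrArg (v :: ·) (kfE_congr r fun x => ?_)
        simp only [List.mem_cons]; tauto

theorem mem_lastOrd (l : List String) (x : String) : x ∈ lastOrd l ↔ x ∈ l := by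
  simp [lastOrd, mem_kfE]

theorem nodup_lastOrd (l : List String) : (lastOrd l).Nodup :=
  List.nodup_reverse.2 (nodup_kfE _ _)

theorem reverse_erase_of_nodup (u : List String) (hu : u.Nodup) (w : String) :
    (u.erase w).reverse = u.reverse.erase w := by
  rw [hu.erase_eq_filter, ← List.filter_reverse,
    ← (List.nodup_reverse.2 hu).erase_eq_filter]

theorem lastOrd_append (l : List String) (w : String) :
    lastOrd (l ++ [w]) = (lastOrd l).erase w ++ [w] := by
  have h1 : (l ++ [w]).reverse = w :: l.reverse := by simp
  simp only [lastOrd, h1, kfE, List.not_mem_nil]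
  rw [if_neg (by simp), kfE_cons_seen, List.reverse_cons,
    reverse_erase_of_nodup _ (nodup_kfE _ _)]

-- A's inner loop finds no match
theorem inner_not_found (w : String) : ∀ (ts full : List (String × Int)),
    (∀ t ∈ ts, t.1 ≠ w) → touplogramInner w ts full = full ++ [(w, 1)]
  | [], full, _ => rfl
  | t :: rest, full, h => by
    simp only [touplogramInner]
    rw [if_neg (by simpa using (h t (List.mem_cons_self)).symm)]
    exact inner_not_found w rest full fun t' ht' => h t' (List.mem_cons_of_mem _ ht')

-- A's inner loop over a list of shape (x, c x): the first match is (w, c w)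
theorem inner_found (w : String) (c : String → Int) :
    ∀ (u : List String) (full : List (String × Int)), w ∈ u →
    touplogramInner w (u.map (fun x => (x, c x))) full =
      ((PySem.List.remove? full (w, c w)).getD full) ++ [(w, c w + 1)]
  | [], _, h => absurd h (List.not_mem_nil)
  | v :: u, full, h => by
    simp only [List.map_cons, touplogramInner]
    by_cases hvw : w = v
    · subst hvw; rw [if_pos (by simp)]
    · rw [if_neg (by simpa using hvw)]
      exact inner_found w c u full (by rcases List.mem_cons.1 h with h | h; exact absurd h hvw; exact h)

theorem pairFst_injective (c : String → Int) :
    Function.Injective (fun x : String => (x, c x)) :=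
  fun _ _ h => congrArg Prod.fst h

theorem A_eq_cano (l : List String) : touplogram l = cano l := by
  induction l using List.reverseRecOn with
  | nil => rfl
  | append_singleton l w ih =>
    have hstep : touplogram (l ++ [w]) = touplogramInner w (touplogram l) (touplogram l) := by
      simp [touplogram, List.foldl_append]
    rw [hstep, ih]
    by_cases hw : w ∈ l
    · -- match found: remove (w, count) and append (w, count + 1)
      have hwlo : w ∈ lastOrd l := (mem_lastOrd l w).2 hw
      have hmem : (w, (l.count w : Int)) ∈ (lastOrd l).map (fun x => (x, (l.count x : Int))) :=
        List.mem_map_of_mem hwlo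
      rw [show cano l = (lastOrd l).map (fun x => (x, (l.count x : Int))) from rfl,
        inner_found w _ (lastOrd l) _ hwlo,
        PySem.List.remove?_eq_some_erase _ _ hmem, Option.getD_some,
        ← List.map_erase (pairFst_injective _)]
      simp only [cano, lastOrd_append, List.map_append, List.map_cons, List.map_nil]
      congr 1
      · refine List.map_congr_left fun x hx => ?_
        have hx' : x ≠ w := ((nodup_lastOrd l).mem_erase_iff.1 hx).1
        simp [List.count_append, Ne.symm hx']
      · simp [List.count_append]
    · -- no match: append (w, 1)
      have hnone : ∀ t ∈ cano l, t.1 ≠ w := by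
        intro t ht
        rcases List.mem_map.1 ht with ⟨x, hx, rfl⟩
        exact fun hc => hw (hc ▸ (mem_lastOrd l x).1 hx)
      rw [inner_not_found w _ _ hnone]
      have hwlo : w ∉ lastOrd l := fun hc => hw ((mem_lastOrd l w).1 hc)
      simp only [cano, lastOrd_append, List.erase_of_not_mem hwlo, List.map_append,
        List.map_cons, List.map_nil]
      congr 1
      · refine List.map_congr_left fun x hx => ?_
        have hx' : x ≠ w := fun hc => hwlo (hc ▸ hx)
        simp [List.count_append, Ne.symm hx']
      · simp [List.count_append, List.count_eq_zero_of_not_mem hw]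

-- B's reverse pass with a seen set emits exactly kfE of what remains
theorem B_pass (counts : PySem.Dict String Int) :
    ∀ (r : List String) (res : List (String × Int)) (s : PySem.Set String),
    (r.foldl (fun (st : List (String × Int) × PySem.Set String) w =>
        if PySem.Set.contains st.2 w then st
        else (st.1 ++ [(w, counts.getD w 0)], PySem.Set.add st.2 w)) (res, s)).1
      = res ++ (kfE r s).map (fun x => (x, counts.getD x 0))
  | [], res, s => by simp [kfE]
  | w :: r, res, s => by
    simp only [List.foldl_cons, kfE]
    by_cases hw : w ∈ s
    · rw [if_pos (by simpa [PySem.Set.contains] using hw), if_pos hw]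
      exact B_pass counts r res s
    · rw [if_neg (by simpa [PySem.Set.contains] using hw), if_neg hw]
      rw [B_pass counts r _ _]
      rw [kfE_congr r (s := PySem.Set.add s w) (s' := w :: s)
        (fun x => by rw [PySem.Set.mem_add]; simp only [List.mem_cons]; tauto)]
      simp [kfE_cons_seen]

theorem B_eq_cano (l : List String) : touplogram_alt l = cano l := by
  show (l.reverse.foldl _ ([], PySem.Set.empty)).1.reverse = _
  rw [B_pass]
  have hcount : ∀ x : String,
      (l.foldl (fun d w => d.insert w (d.getD w 0 + 1)) PySem.Dict.empty).getD x 0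
        = (l.count x : Int) := by
    intro x
    rw [PySem.Dict.getD_foldl_insert_add_one]
    simp [PySem.Dict.getD_empty]
  simp only [List.nil_append, cano, lastOrd, ← List.map_reverse]
  exact List.map_congr_left fun x _ => by rw [hcount]

-- ===== VERDICT (by name: the statement is the Claim_ definition above) =====
theorem touplogram_spec : Claim_equal_touplogram := by
  intro l _
  unfold Spec_touplogram
  rw [A_eq_cano, B_eq_cano]
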